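-- pv_equiv track=rewrite | github.com/DevyRuxpin/BigMoeHunter | app/services/local_news_service.py | _is_relevant_content
-- ===== SOURCE A (Python) =====
-- from typing import Dict, List, Optional
--
-- def _is_relevant_content(entry: Dict, source_category: str) -> bool:
--     """Check if content is relevant to hunting/outdoors/local news"""
--     title = entry.get('title', '').lower()
--     summary = entry.get('summary', '').lower()
--
--     # Keywords for relevant content
--     hunting_keywords = [
--         'hunting', 'deer', 'moose', 'bear', 'turkey', 'fishing', 'outdoor',
--         'wildlife', 'game', 'season', 'license', 'permit', 'forest', 'woods'
--     ]
--
--     local_keywords = [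
--         'colebrook', 'coos county', 'berlin', 'lancaster', 'pittsburg',
--         'dixville notch', 'connecticut lakes', 'new hampshire', 'nh'
--     ]
--
--     # Check for hunting/outdoor relevance
--     if source_category == "hunting_outdoors":
--         return any(keyword in title or keyword in summary for keyword in hunting_keywords)
--
--     # Check for local relevance
--     if source_category in ["local_newspapers", "regional_sources"]:
--         return any(keyword in title or keyword in summary for keyword in local_keywords + hunting_keywords)
--
--     return True  # Include all content if no specific filtering
-- ===== SOURCE B (Python) =====
-- def _is_relevant_content(entry, source_category):
--     """Check if content is relevant to hunting/outdoors/local news."""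
--     title = entry.get('title', '').lower()
--     summary = entry.get('summary', '').lower()
--
--     hunting_keywords = [
--         'hunting', 'deer', 'moose', 'bear', 'turkey', 'fishing', 'outdoor',
--         'wildlife', 'game', 'season', 'license', 'permit', 'forest', 'woods'
--     ]
--
--     local_keywords = [
--         'colebrook', 'coos county', 'berlin', 'lancaster', 'pittsburg',
--         'dixville notch', 'connecticut lakes', 'new hampshire', 'nh'
--     ]
--
--     if source_category == "hunting_outdoors":
--         keywords = hunting_keywords
--     elif source_category in ("local_newspapers", "regional_sources"):
--         keywords = local_keywords + hunting_keywords
--     else: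
--         return True
--
--     # Text-major scan: walk each text once, checking at every position
--     # whether some keyword starts there (instead of one full substring
--     # search per keyword).
--     for text in (title, summary):
--         for i in range(len(text) + 1):
--             if any(text.startswith(k, i) for k in keywords):
--                 return True
--     return False
-- ===== Notes on version B (the rewrite author's own statement) =====
-- stated objective: alternative
-- what changed: Replaced A's keyword-major loop (one full substring search per keyword) by a text-major scan that walks each text's positions once and checks at every position whether some keyword starts there.
import Mathlib
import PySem

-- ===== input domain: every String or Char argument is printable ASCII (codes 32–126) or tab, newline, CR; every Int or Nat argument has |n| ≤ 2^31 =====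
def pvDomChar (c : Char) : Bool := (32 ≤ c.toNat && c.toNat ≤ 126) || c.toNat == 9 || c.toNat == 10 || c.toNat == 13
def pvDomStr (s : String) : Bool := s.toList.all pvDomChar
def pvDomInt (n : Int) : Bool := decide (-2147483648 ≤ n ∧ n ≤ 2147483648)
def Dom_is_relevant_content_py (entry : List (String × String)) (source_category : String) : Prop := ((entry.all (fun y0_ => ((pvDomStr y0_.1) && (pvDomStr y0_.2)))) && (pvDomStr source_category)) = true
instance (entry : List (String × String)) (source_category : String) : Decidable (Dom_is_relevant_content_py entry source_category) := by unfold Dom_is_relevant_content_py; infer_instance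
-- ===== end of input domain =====

-- B replaces A's keyword-major loop (one full substring search per keyword) by a text-major
-- scan: walk each text's positions once and check whether some keyword starts there
-- (objective: alternative decomposition; same asymptotic cost).


-- ===== PORT A =====
def pvHuntingKeywords : List String :=
  ["hunting", "deer", "moose", "bear", "turkey", "fishing", "outdoor",
   "wildlife", "game", "season", "license", "permit", "forest", "woods"]

def pvLocalKeywords : List String :=
  ["colebrook", "coos county", "berlin", "lancaster", "pittsburg",
   "dixville notch", "connecticut lakes", "new hampshire", "nh"]

def is_relevant_content_py (entry : List (String × String)) (source_category : String) : Bool :=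
  let title := PySem.Str.lower ((PySem.Dict.ofList entry : PySem.Dict String String).getD "title" "")
  let summary := PySem.Str.lower ((PySem.Dict.ofList entry : PySem.Dict String String).getD "summary" "")
  if source_category == "hunting_outdoors" then
    pvHuntingKeywords.any (fun keyword => PySem.Str.isIn keyword title || PySem.Str.isIn keyword summary)
  else if source_category == "local_newspapers" || source_category == "regional_sources" then
    (pvLocalKeywords ++ pvHuntingKeywords).any (fun keyword => PySem.Str.isIn keyword title || PySem.Str.isIn keyword summary)
  else
    true

-- ===== PORT B =====
-- Source B's inner scan: for each start position of `text` (all suffixes, including the empty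
-- one, matching range(len(text) + 1)), does some keyword start there?
def pvScanText (kws : List (List Char)) : List Char → Bool
  | [] => kws.any (fun k => PySem.Chars.startswith [] k)
  | c :: rest => kws.any (fun k => PySem.Chars.startswith (c :: rest) k) || pvScanText kws rest

def is_relevant_content_py_alt (entry : List (String × String)) (source_category : String) : Bool :=
  let title := (PySem.Str.lower ((PySem.Dict.ofList entry : PySem.Dict String String).getD "title" "")).toList
  let summary := (PySem.Str.lower ((PySem.Dict.ofList entry : PySem.Dict String String).getD "summary" "")).toList
  let keywords? : Option (List (List Char)) :=
    if source_category == "hunting_outdoors" then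
      some (pvHuntingKeywords.map String.toList)
    else if source_category == "local_newspapers" || source_category == "regional_sources" then
      some ((pvLocalKeywords ++ pvHuntingKeywords).map String.toList)
    else
      none
  match keywords? with
  | none => true
  | some kws => pvScanText kws title || pvScanText kws summary

-- ===== PRECONDITION & SPEC =====
def Spec_is_relevant_content_py (entry : List (String × String)) (source_category : String) (out : Bool) : Prop := out = is_relevant_content_py_alt entry source_category
instance (entry : List (String × String)) (source_category : String) (out : Bool) : Decidable (Spec_is_relevant_content_py entry source_category out) := by unfold Spec_is_relevant_content_py; infer_instance

-- ===== CLAIM (what is proved, stated in full; the proofs are below) =====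
def Claim_equal_is_relevant_content_py : Prop := ∀ (entry : List (String × String)) (source_category : String), Dom_is_relevant_content_py entry source_category → Spec_is_relevant_content_py entry source_category (is_relevant_content_py entry source_category)

-- ===== LEMMAS AND PROOFS =====

-- The text-major scan finds a keyword iff that keyword is a prefix of some suffix of the text.
lemma pvScanText_true_iff (kws : List (List Char)) (text : List Char) :
    pvScanText kws text = true ↔ ∃ k ∈ kws, ∃ j, k <+: text.drop j := by
  induction text with
  | nil =>
    simp only [pvScanText, List.any_eq_true, PySem.Chars.startswith, List.isPrefixOf_iff_prefix,
      List.drop_nil]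
    exact ⟨fun ⟨k, hk, hp⟩ => ⟨k, hk, 0, hp⟩, fun ⟨k, hk, _, hp⟩ => ⟨k, hk, hp⟩⟩
  | cons c rest ih =>
    simp only [pvScanText, Bool.or_eq_true, List.any_eq_true, PySem.Chars.startswith,
      List.isPrefixOf_iff_prefix, ih]
    constructor
    · rintro (⟨k, hk, hp⟩ | ⟨k, hk, j, hp⟩)
      · exact ⟨k, hk, 0, hp⟩
      · exact ⟨k, hk, j + 1, hp⟩
    · rintro ⟨k, hk, j, hp⟩
      cases j with
      | zero => exact Or.inl ⟨k, hk, hp⟩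
      | succ j => exact Or.inr ⟨k, hk, j, hp⟩

-- The scan over a keyword list equals the keyword-major `sub in text` check.
lemma pvScanText_eq_any_isIn (kws : List (List Char)) (text : List Char) :
    pvScanText kws text = kws.any (fun k => PySem.Chars.isIn k text) := by
  rw [Bool.eq_iff_iff, pvScanText_true_iff]
  simp only [List.any_eq_true]
  constructor
  · rintro ⟨k, hk, j, hp⟩
    exact ⟨k, hk, (PySem.Chars.exists_prefix_drop_iff_isIn k text).mp ⟨j, hp⟩⟩
  · rintro ⟨k, hk, hin⟩
    obtain ⟨j, hp⟩ := (PySem.Chars.exists_prefix_drop_iff_isIn k text).mpr hin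
    exact ⟨k, hk, j, hp⟩

-- per-branch agreement: A's `any (in title or in summary)` = B's `scan title || scan summary`
lemma pvBranch_eq (kws : List String) (title summary : String) :
    kws.any (fun keyword => PySem.Str.isIn keyword title || PySem.Str.isIn keyword summary)
      = (pvScanText (kws.map String.toList) title.toList
          || pvScanText (kws.map String.toList) summary.toList) := by
  simp only [pvScanText_eq_any_isIn, List.any_map, Function.comp_def, PySem.Str.isIn_eq]
  rw [Bool.eq_iff_iff]
  simp only [Bool.or_eq_true, List.any_eq_true]
  constructor
  · rintro ⟨k, hk, h | h⟩
    · exact Or.inl ⟨k, hk, h⟩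
    · exact Or.inr ⟨k, hk, h⟩
  · rintro (⟨k, hk, h⟩ | ⟨k, hk, h⟩)
    · exact ⟨k, hk, Or.inl h⟩
    · exact ⟨k, hk, Or.inr h⟩

theorem pv_main (entry : List (String × String)) (source_category : String) :
    is_relevant_content_py entry source_category = is_relevant_content_py_alt entry source_category := by
  unfold is_relevant_content_py is_relevant_content_py_alt
  by_cases h1 : source_category == "hunting_outdoors"
  · simp only [h1, if_pos]
    exact pvBranch_eq _ _ _
  · by_cases h2 : (source_category == "local_newspapers" || source_category == "regional_sources") = true
    · simp only [h1, h2, Bool.false_eq_true, if_false, if_true]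
      exact pvBranch_eq _ _ _
    · simp only [h1, h2, Bool.false_eq_true, if_false]

-- ===== VERDICT (by name: the statement is the Claim_ definition above) =====
theorem is_relevant_content_py_spec : Claim_equal_is_relevant_content_py := by
  intro entry source_category _
  exact pv_main entry source_category
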